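-- pv_equiv track=rewrite | github.com/msabramo/Doula | doula/helper_filters.py | version_number_to_git_tag
-- ===== SOURCE A (Python) =====
-- def version_number_to_git_tag(version):
--     """
--     Convert a version number to a git tag
--     Git tags use underscores, while our version numbers sometimes use dashes.
--     A typical version number is like so: [version number]-[git branch]
--     Ex.
--     2.6.93-server-throttling -> 2.6.93-server_throttling
--     """
--     version_list = version.split('-')
--     version_number = version_list.pop(0)
--     branch_name = ''
--
--     for part in version_list:
--         branch_name += part + '_'
--
--     if branch_name:
--         return version_number + '-' + branch_name.rstrip('_')
--     else:
--         return version_number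
-- ===== SOURCE B (Python) =====
-- def version_number_to_git_tag(version):
--     """
--     Convert a version number to a git tag
--     Git tags use underscores, while our version numbers sometimes use dashes.
--     """
--     parts = version.split('-', 1)
--     if len(parts) == 2:
--         return parts[0] + '-' + parts[1].replace('-', '_').rstrip('_')
--     return version
-- ===== Notes on version B (the rewrite author's own statement) =====
-- stated objective: simpler
-- what changed: Replaces A's full split plus per-part string-accumulation loop and final rstrip by a single maxsplit-1 split with a library replace/rstrip on the remainder (no loop, no join-then-strip).
import Mathlib
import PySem

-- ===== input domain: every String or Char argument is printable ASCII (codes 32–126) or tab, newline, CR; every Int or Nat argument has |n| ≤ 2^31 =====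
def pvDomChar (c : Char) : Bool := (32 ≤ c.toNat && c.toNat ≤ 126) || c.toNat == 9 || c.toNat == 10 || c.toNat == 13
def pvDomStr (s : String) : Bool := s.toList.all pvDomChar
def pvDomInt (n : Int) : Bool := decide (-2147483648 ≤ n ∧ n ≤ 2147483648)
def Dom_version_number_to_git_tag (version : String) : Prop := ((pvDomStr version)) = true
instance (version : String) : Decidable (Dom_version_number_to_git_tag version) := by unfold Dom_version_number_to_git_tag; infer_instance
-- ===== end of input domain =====

-- B replaces A's full split + join-with-'_' loop + strip by a single maxsplit-1 split
-- with a library replace/rstrip on the remainder (objective: simpler/idiomatic; same cost).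

-- exact hand port of Python's s.rstrip('_') (PySem.Chars.rstrip only strips whitespace):
-- drop every trailing '_' character
def pvRstripU (l : List Char) : List Char := (l.reverse.dropWhile (· == '_')).reverse

-- ===== PORT A =====
def version_number_to_git_tag (version : String) : String :=
  let versionList := PySem.Chars.splitOn version.toList ['-']   -- version.split('-'); sep ≠ '' so never raises
  let versionNumber := versionList.headD []                     -- version_list.pop(0); split result is never empty
  let rest := versionList.tail
  let branchName := rest.foldl (fun b part => b ++ (part ++ ['_'])) []   -- branch_name += part + '_'
  if branchName ≠ [] then String.ofList (versionNumber ++ ['-'] ++ pvRstripU branchName)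
  else String.ofList versionNumber

-- ===== PORT B =====
def version_number_to_git_tag_alt (version : String) : String :=
  match PySem.Chars.splitOnMax version.toList ['-'] 1 with      -- version.split('-', 1)
  | [head, tail] =>
      String.ofList (head ++ ['-'] ++ pvRstripU (PySem.Chars.replace tail ['-'] ['_']))
  | _ => version

-- ===== PRECONDITION & SPEC =====
def Spec_version_number_to_git_tag (version : String) (out : String) : Prop := out = version_number_to_git_tag_alt version
instance (version : String) (out : String) : Decidable (Spec_version_number_to_git_tag version out) := by unfold Spec_version_number_to_git_tag; infer_instance

-- ===== CLAIM (what is proved, stated in full; the proofs are below) =====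
def Claim_equal_version_number_to_git_tag : Prop := ∀ (version : String), Dom_version_number_to_git_tag version → Spec_version_number_to_git_tag version (version_number_to_git_tag version)

-- ===== LEMMAS AND PROOFS =====

def pvSplitDash (l : List Char) : List (List Char) :=
  l.takeWhile (· ≠ '-') ::
    (if h : '-' ∈ l then pvSplitDash ((l.dropWhile (· ≠ '-')).tail) else [])
termination_by l.length
decreasing_by
  have h1 : l.dropWhile (· ≠ '-') ≠ [] := by
    simp [List.dropWhile_eq_nil_iff]
    exact h
  have h2 := List.length_dropWhile_le (p := (· ≠ '-')) (l := l)
  cases hd : l.dropWhile (· ≠ '-') with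
  | nil => exact absurd hd h1
  | cons c t =>
    have := hd ▸ h2
    simp at this ⊢
    omega

theorem pvSplitDash_cons_dash (rest : List Char) :
    pvSplitDash ('-' :: rest) = [] :: pvSplitDash rest := by
  rw [pvSplitDash]
  simp [List.takeWhile, List.dropWhile]

theorem pvSplitDash_cons_ne (c : Char) (hc : c ≠ '-') (rest : List Char) :
    pvSplitDash (c :: rest) = (pvSplitDash rest).modifyHead (c :: ·) := by
  conv_lhs => rw [pvSplitDash]
  conv_rhs => rw [pvSplitDash]
  have h2 : ('-' ∈ (c::rest)) ↔ ('-' ∈ rest) := by simp [Ne.symm hc]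
  simp only [List.takeWhile_cons, List.dropWhile_cons, decide_eq_true_eq]
  by_cases hm : '-' ∈ rest
  · simp [hm, h2, hc]
  · simp [hm, h2, hc]

theorem splitOn_go_dash (fuel : Nat) : ∀ (l cur : List Char) (acc : List (List Char)),
    l.length ≤ fuel →
    PySem.Chars.splitOn.go ['-'] fuel l cur acc
      = acc.reverse ++ (pvSplitDash l).modifyHead (cur.reverse ++ ·) := by
  induction fuel with
  | zero =>
    intro l cur acc h
    have : l = [] := by cases l <;> simp_all
    subst this
    show ((cur.reverse ++ []) :: acc).reverse = _
    rw [pvSplitDash]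
    simp
  | succ fuel ih =>
    intro l cur acc h
    cases l with
    | nil =>
      show (cur.reverse :: acc).reverse = _
      rw [pvSplitDash]; simp
    | cons c rest =>
      by_cases hc : c = '-'
      · subst hc
        show PySem.Chars.splitOn.go ['-'] fuel (List.drop 1 ('-'::rest)) [] (cur.reverse :: acc) = _
        rw [ih _ _ _ (by simpa using Nat.le_of_succ_le_succ h), pvSplitDash_cons_dash]
        cases hp : pvSplitDash rest <;> simp [hp]
      · have hstep : PySem.Chars.splitOn.go ['-'] (fuel+1) (c::rest) cur acc
            = PySem.Chars.splitOn.go ['-'] fuel rest (c :: cur) acc := by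
          have : ['-'].isPrefixOf (c::rest) = false := by
            simp [List.isPrefixOf]; exact fun hh => absurd hh.symm hc
          show (if ['-'].isPrefixOf (c::rest) then PySem.Chars.splitOn.go ['-'] fuel (List.drop 1 (c::rest)) [] (cur.reverse :: acc)
            else PySem.Chars.splitOn.go ['-'] fuel rest (c :: cur) acc) = _
          rw [this]; simp
        rw [hstep, ih _ _ _ (by simpa using Nat.le_of_succ_le_succ h), pvSplitDash_cons_ne c hc]
        cases hp : pvSplitDash rest with
        | nil => simp
        | cons p ps => simp

theorem splitOn_dash (cs : List Char) :
    PySem.Chars.splitOn cs ['-'] = pvSplitDash cs := by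
  show PySem.Chars.splitOn.go ['-'] (cs.length + 1) cs [] [] = _
  rw [splitOn_go_dash _ _ _ _ (by omega)]
  cases hp : pvSplitDash cs <;> simp

theorem goMax_zero (fuel : Nat) (l cur : List Char) (acc : List (List Char)) :
    PySem.Chars.splitOnMax.go ['-'] fuel 0 l cur acc = acc.reverse ++ [cur.reverse ++ l] := by
  cases fuel with
  | zero => show ((cur.reverse ++ l) :: acc).reverse = _ ; simp
  | succ fuel => cases l with
    | nil => show (cur.reverse :: acc).reverse = _ ; simp
    | cons c rest =>
      show (if (0:Nat) = 0 then ((cur.reverse ++ (c::rest)) :: acc).reverse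
        else if ['-'].isPrefixOf (c::rest) then PySem.Chars.splitOnMax.go ['-'] fuel (0-1) (List.drop 1 (c::rest)) [] (cur.reverse :: acc)
        else PySem.Chars.splitOnMax.go ['-'] fuel 0 rest (c :: cur) acc) = _
      simp

theorem goMax_one (fuel : Nat) : ∀ (l cur : List Char) (acc : List (List Char)),
    l.length ≤ fuel →
    PySem.Chars.splitOnMax.go ['-'] fuel 1 l cur acc
      = acc.reverse ++ (if '-' ∈ l
          then [cur.reverse ++ l.takeWhile (· ≠ '-'), (l.dropWhile (· ≠ '-')).tail]
          else [cur.reverse ++ l]) := by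
  induction fuel with
  | zero =>
    intro l cur acc h
    have : l = [] := by cases l <;> simp_all
    subst this
    show ((cur.reverse ++ []) :: acc).reverse = _
    simp
  | succ fuel ih =>
    intro l cur acc h
    cases l with
    | nil => show (cur.reverse :: acc).reverse = _ ; simp
    | cons c rest =>
      by_cases hc : c = '-'
      · subst hc
        show PySem.Chars.splitOnMax.go ['-'] fuel 0 (List.drop 1 ('-'::rest)) [] (cur.reverse :: acc) = _
        rw [goMax_zero]
        simp
      · have hstep : PySem.Chars.splitOnMax.go ['-'] (fuel+1) 1 (c::rest) cur acc
            = PySem.Chars.splitOnMax.go ['-'] fuel 1 rest (c :: cur) acc := by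
          have hp : ['-'].isPrefixOf (c::rest) = false := by
            simp [List.isPrefixOf]; exact fun hh => absurd hh.symm hc
          show (if (1:Nat) = 0 then ((cur.reverse ++ (c::rest)) :: acc).reverse
            else if ['-'].isPrefixOf (c::rest) then PySem.Chars.splitOnMax.go ['-'] fuel 0 (List.drop 1 (c::rest)) [] (cur.reverse :: acc)
            else PySem.Chars.splitOnMax.go ['-'] fuel 1 rest (c :: cur) acc) = _
          rw [hp]; simp
        rw [hstep, ih _ _ _ (by simpa using Nat.le_of_succ_le_succ h)]
        simp [hc, Ne.symm hc]

theorem splitOnMax_one (cs : List Char) :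
    PySem.Chars.splitOnMax cs ['-'] 1
      = if '-' ∈ cs then [cs.takeWhile (· ≠ '-'), (cs.dropWhile (· ≠ '-')).tail] else [cs] := by
  show (if (1:Int) < 0 then _ else PySem.Chars.splitOnMax.go ['-'] (cs.length+1) (Int.toNat 1) cs [] []) = _
  rw [if_neg (by omega)]
  simp only [Int.toNat_one]
  rw [goMax_one _ _ _ _ (by omega)]
  simp

def pvRepl (c : Char) : Char := if c = '-' then '_' else c

theorem replace_go (fuel : Nat) : ∀ (l acc : List Char),
    l.length ≤ fuel →
    PySem.Chars.replace.go ['-'] ['_'] fuel l acc = acc.reverse ++ l.map pvRepl := by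
  induction fuel with
  | zero =>
    intro l acc h
    have : l = [] := by cases l <;> simp_all
    subst this; show acc.reverse ++ [] = _ ; simp
  | succ fuel ih =>
    intro l acc h
    cases l with
    | nil => show acc.reverse = _ ; simp
    | cons c rest =>
      by_cases hc : c = '-'
      · subst hc
        show PySem.Chars.replace.go ['-'] ['_'] fuel (List.drop 1 ('-'::rest)) (['_'].reverse ++ acc) = _
        rw [ih _ _ (by simpa using Nat.le_of_succ_le_succ h)]
        simp [pvRepl]
      · have hp : ['-'].isPrefixOf (c::rest) = false := by
          simp [List.isPrefixOf]; exact fun hh => absurd hh.symm hc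
        have hstep : PySem.Chars.replace.go ['-'] ['_'] (fuel+1) (c::rest) acc
            = PySem.Chars.replace.go ['-'] ['_'] fuel rest (c :: acc) := by
          show (if ['-'].isPrefixOf (c::rest) then PySem.Chars.replace.go ['-'] ['_'] fuel (List.drop 1 (c::rest)) (['_'].reverse ++ acc)
            else PySem.Chars.replace.go ['-'] ['_'] fuel rest (c :: acc)) = _
          rw [hp]; simp
        rw [hstep, ih _ _ (by simpa using Nat.le_of_succ_le_succ h)]
        simp [pvRepl, hc]

theorem replace_dash (cs : List Char) :
    PySem.Chars.replace cs ['-'] ['_'] = cs.map pvRepl := by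
  show (if (['-'] : List Char).isEmpty then _ else PySem.Chars.replace.go ['-'] ['_'] cs.length cs []) = _
  rw [if_neg (by simp)]
  rw [replace_go _ _ _ (le_refl _)]
  simp

theorem rstrip_app_underscore (x : List Char) : pvRstripU (x ++ ['_']) = pvRstripU x := by
  simp [pvRstripU]

theorem rstrip_congr (w X Y : List Char) (h : pvRstripU X = pvRstripU Y) :
    pvRstripU (w ++ X) = pvRstripU (w ++ Y) := by
  unfold pvRstripU at *
  have h' : X.reverse.dropWhile (· == '_') = Y.reverse.dropWhile (· == '_') :=
    List.reverse_inj.mp h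
  rw [List.reverse_append, List.reverse_append, List.dropWhile_append, List.dropWhile_append, h']

theorem map_repl_id (b : List Char) (h : '-' ∉ b) : b.map pvRepl = b := by
  induction b with
  | nil => rfl
  | cons c t ih =>
    simp at h
    have hc : c ≠ '-' := fun hc => h.1 hc.symm
    rw [List.map_cons, ih h.2]
    simp [pvRepl, hc]

theorem mem_decomp (a : List Char) (h : '-' ∈ a) :
    a = a.takeWhile (· ≠ '-') ++ '-' :: (a.dropWhile (· ≠ '-')).tail ∧
    '-' ∉ a.takeWhile (· ≠ '-') := by
  refine ⟨?_, fun hm => by simpa using List.mem_takeWhile_imp hm⟩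
  induction a with
  | nil => simp at h
  | cons c t ih =>
    by_cases hc : c = '-'
    · subst hc; simp
    · have hmt : '-' ∈ t := by
        rcases List.mem_cons.mp h with h1 | h1
        · exact absurd h1.symm hc
        · exact h1
      simp only [List.takeWhile_cons, List.dropWhile_cons, hc, ne_eq,
        not_false_iff, decide_true, if_true, List.cons_append]
      rw [List.cons_inj_right]
      exact ih hmt

theorem key_lemma (a : List Char) :
    pvRstripU ((pvSplitDash a).flatMap (· ++ ['_'])) = pvRstripU (a.map pvRepl) := by
  induction a using pvSplitDash.induct with
  | _ l ih =>
    by_cases hm : '-' ∈ l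
    · obtain ⟨hdec, hnot⟩ := mem_decomp l hm
      rw [pvSplitDash, dif_pos hm]
      conv_rhs => rw [hdec]
      rw [List.flatMap_cons, List.map_append, map_repl_id _ hnot, List.map_cons]
      have hrepl : pvRepl '-' = '_' := rfl
      rw [hrepl]
      have hR : l.takeWhile (· ≠ '-') ++ '_' :: ((l.dropWhile (· ≠ '-')).tail).map pvRepl
          = (l.takeWhile (· ≠ '-') ++ ['_']) ++ ((l.dropWhile (· ≠ '-')).tail).map pvRepl := by
        simp
      rw [hR]
      exact rstrip_congr _ _ _ (ih hm)
    · rw [pvSplitDash, dif_neg hm]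
      have ht : l.takeWhile (· ≠ '-') = l := by
        rw [List.takeWhile_eq_self_iff]
        intro x hx
        simp
        exact fun he => hm (he ▸ hx)
      rw [List.flatMap_cons, List.flatMap_nil, List.append_nil, ht,
        rstrip_app_underscore, map_repl_id _ hm]

theorem foldl_flat (ps : List (List Char)) : ∀ (b0 : List Char),
    ps.foldl (fun b p => b ++ (p ++ ['_'])) b0 = b0 ++ ps.flatMap (· ++ ['_']) := by
  induction ps with
  | nil => intro b0; simp
  | cons p t ih => intro b0; simp [List.foldl_cons, ih, List.append_assoc]

theorem main (version : String) :
    version_number_to_git_tag version = version_number_to_git_tag_alt version := by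
  unfold version_number_to_git_tag version_number_to_git_tag_alt
  rw [splitOn_dash, splitOnMax_one]
  by_cases hm : '-' ∈ version.toList
  · rw [pvSplitDash, dif_pos hm, if_pos hm]
    simp only [List.headD_cons, List.tail_cons, foldl_flat, List.nil_append]
    have hne : (pvSplitDash ((version.toList.dropWhile (· ≠ '-')).tail)).flatMap (· ++ ['_']) ≠ [] := by
      rw [pvSplitDash, List.flatMap_cons]
      simp
    rw [if_pos hne, replace_dash, key_lemma]
  · rw [pvSplitDash, dif_neg hm, if_neg hm]
    have ht : version.toList.takeWhile (· ≠ '-') = version.toList := by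
      rw [List.takeWhile_eq_self_iff]
      intro x hx
      simp
      exact fun he => hm (he ▸ hx)
    simp only [List.tail_cons, List.foldl_nil, ne_eq, not_true_eq_false]
    rw [ht]
    simp [String.ofList]

-- ===== VERDICT (by name: the statement is the Claim_ definition above) =====
theorem version_number_to_git_tag_spec : Claim_equal_version_number_to_git_tag := by
  intro version _
  unfold Spec_version_number_to_git_tag
  exact main version
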